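-- pv_equiv track=rewrite | github.com/solo4games/Speaking_Club | speaking_club/apps/speaking_clubs/helpers.py | define_total_level
-- ===== SOURCE A (Python) =====
-- def define_total_level(grammar: str, listening: str, writing: str, reading: str, vocabulary: str):
--     if any([el == -1 or el == '-' for el in (grammar, listening, writing, reading, vocabulary)]):
--         return {
--             "total": "-"
--         }
--
--     if (grammar == "A1") and (vocabulary == "A1"):
--         return {
--             "total": "A1"
--         }
--
--     if (grammar == "A1") and (vocabulary == "A2" or vocabulary == "B1") and writing == "A1":
--         return {
--             "total": "A1"
--         }
--
--     if (grammar == "A1") and (vocabulary == "A2" or vocabulary == "B1") and (writing == "A2" or writing == "B1"):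
--         return {
--             "total": "A2"
--         }
--
--     if (grammar == "A2") and (vocabulary == "A2" or vocabulary == "B1"):
--         return {
--             "total": "A2"
--         }
--
--     if (grammar == "A2") and (vocabulary == "A1") and writing == "A1":
--         return {
--             "total": "A1"
--         }
--
--     if (grammar == "A2") and (vocabulary == "A1") and (writing == "A2" or writing == "B1"):
--         return {
--             "total": "A2"
--         }
--
--     if (grammar == "B1") and (vocabulary == "A2" or vocabulary == "B1"):
--         return {
--             "total": "B1"
--         }
--
--     if (grammar == "B1") and (vocabulary == "A1"):
--         return {
--             "total": "A2"
--         }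
-- ===== SOURCE B (Python) =====
-- def _bucket(x):
--     return "A1" if x == "A1" else ("A2B1" if x in ("A2", "B1") else None)
--
-- _TABLE = {}
-- for _g, _vb, _total in (("A1", "A1", "A1"), ("A2", "A2B1", "A2"),
--                         ("B1", "A2B1", "B1"), ("B1", "A1", "A2")):
--     for _wb in ("A1", "A2B1", None):
--         _TABLE[(_g, _vb, _wb)] = _total
-- for _g, _vb in (("A1", "A2B1"), ("A2", "A1")):
--     _TABLE[(_g, _vb, "A1")] = "A1"
--     _TABLE[(_g, _vb, "A2B1")] = "A2"
--
-- def define_total_level(grammar, listening, writing, reading, vocabulary):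
--     if "-" in (grammar, listening, writing, reading, vocabulary):
--         return {"total": "-"}
--     total = _TABLE.get((grammar, _bucket(vocabulary), _bucket(writing)))
--     return None if total is None else {"total": total}
-- ===== Notes on version B (the rewrite author's own statement) =====
-- stated objective: idiomatic
-- what changed: Replaces A's nine-branch if/elif chain by a module-level lookup dict keyed by (grammar, vocabulary-bucket, writing-bucket), with A2/B1 folded into one bucket and a single dict.get after the '-' guard.
import Mathlib
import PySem

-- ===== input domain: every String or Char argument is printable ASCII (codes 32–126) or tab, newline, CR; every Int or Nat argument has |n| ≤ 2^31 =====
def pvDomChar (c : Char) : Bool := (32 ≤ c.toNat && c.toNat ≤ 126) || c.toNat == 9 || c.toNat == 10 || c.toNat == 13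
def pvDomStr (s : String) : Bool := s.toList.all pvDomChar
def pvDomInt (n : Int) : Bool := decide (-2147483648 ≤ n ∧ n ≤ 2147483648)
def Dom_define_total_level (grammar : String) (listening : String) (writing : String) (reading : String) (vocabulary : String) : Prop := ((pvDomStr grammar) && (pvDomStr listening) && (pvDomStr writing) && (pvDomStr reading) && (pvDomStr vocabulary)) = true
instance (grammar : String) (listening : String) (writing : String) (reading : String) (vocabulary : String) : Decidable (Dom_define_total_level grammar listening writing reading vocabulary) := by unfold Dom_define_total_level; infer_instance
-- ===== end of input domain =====

-- B replaces A's nine-branch if-chain by a module-level lookup table keyed by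
-- (grammar, vocabulary-bucket, writing-bucket); idiomatic, not faster.

-- ===== PORT A =====
-- Python's `el == -1` is always False for str arguments, so the guard is `el == '-'`.
def define_total_level (grammar : String) (listening : String) (writing : String) (reading : String) (vocabulary : String) : Option (List (String × String)) :=
  if grammar == "-" || listening == "-" || writing == "-" || reading == "-" || vocabulary == "-" then
    some [("total", "-")]
  else if grammar == "A1" && vocabulary == "A1" then
    some [("total", "A1")]
  else if grammar == "A1" && (vocabulary == "A2" || vocabulary == "B1") && writing == "A1" then
    some [("total", "A1")]
  else if grammar == "A1" && (vocabulary == "A2" || vocabulary == "B1") && (writing == "A2" || writing == "B1") then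
    some [("total", "A2")]
  else if grammar == "A2" && (vocabulary == "A2" || vocabulary == "B1") then
    some [("total", "A2")]
  else if grammar == "A2" && vocabulary == "A1" && writing == "A1" then
    some [("total", "A1")]
  else if grammar == "A2" && vocabulary == "A1" && (writing == "A2" || writing == "B1") then
    some [("total", "A2")]
  else if grammar == "B1" && (vocabulary == "A2" || vocabulary == "B1") then
    some [("total", "B1")]
  else if grammar == "B1" && vocabulary == "A1" then
    some [("total", "A2")]
  else
    none

-- ===== PORT B =====
def pvBucket (x : String) : Option String :=
  if x == "A1" then some "A1" else if x == "A2" || x == "B1" then some "A2B1" else none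

-- the module-level `_TABLE`, built by the same two loops as Source B
def pvTable : PySem.Dict (String × Option String × Option String) String :=
  let d := [("A1", "A1", "A1"), ("A2", "A2B1", "A2"), ("B1", "A2B1", "B1"), ("B1", "A1", "A2")].foldl
    (fun d row =>
      [some "A1", some "A2B1", none].foldl
        (fun d wb => d.insert (row.1, some row.2.1, wb) row.2.2) d)
    PySem.Dict.empty
  [("A1", "A2B1"), ("A2", "A1")].foldl
    (fun d gv =>
      (d.insert (gv.1, some gv.2, some "A1") "A1").insert (gv.1, some gv.2, some "A2B1") "A2")
    d

def define_total_level_alt (grammar : String) (listening : String) (writing : String) (reading : String) (vocabulary : String) : Option (List (String × String)) :=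
  if grammar == "-" || listening == "-" || writing == "-" || reading == "-" || vocabulary == "-" then
    some [("total", "-")]
  else
    match pvTable.get? (grammar, pvBucket vocabulary, pvBucket writing) with
    | none => none
    | some total => some [("total", total)]

-- ===== PRECONDITION & SPEC =====
def Spec_define_total_level (grammar : String) (listening : String) (writing : String) (reading : String) (vocabulary : String) (out : Option (List (String × String))) : Prop := out = define_total_level_alt grammar listening writing reading vocabulary
instance (grammar : String) (listening : String) (writing : String) (reading : String) (vocabulary : String) (out : Option (List (String × String))) : Decidable (Spec_define_total_level grammar listening writing reading vocabulary out) := by unfold Spec_define_total_level; infer_instance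

-- ===== CLAIM (what is proved, stated in full; the proofs are below) =====
def Claim_equal_define_total_level : Prop := ∀ (grammar : String) (listening : String) (writing : String) (reading : String) (vocabulary : String), Dom_define_total_level grammar listening writing reading vocabulary → Spec_define_total_level grammar listening writing reading vocabulary (define_total_level grammar listening writing reading vocabulary)

-- ===== LEMMAS AND PROOFS =====
lemma pvTable_eq : pvTable = PySem.Dict.mk [
    (("A1", some "A1", some "A1"), "A1"),
    (("A1", some "A1", some "A2B1"), "A1"),
    (("A1", some "A1", none), "A1"),
    (("A2", some "A2B1", some "A1"), "A2"),
    (("A2", some "A2B1", some "A2B1"), "A2"),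
    (("A2", some "A2B1", none), "A2"),
    (("B1", some "A2B1", some "A1"), "B1"),
    (("B1", some "A2B1", some "A2B1"), "B1"),
    (("B1", some "A2B1", none), "B1"),
    (("B1", some "A1", some "A1"), "A2"),
    (("B1", some "A1", some "A2B1"), "A2"),
    (("B1", some "A1", none), "A2"),
    (("A1", some "A2B1", some "A1"), "A1"),
    (("A1", some "A2B1", some "A2B1"), "A2"),
    (("A2", some "A1", some "A1"), "A1"),
    (("A2", some "A1", some "A2B1"), "A2")] := by decide

-- ===== VERDICT (by name: the statement is the Claim_ definition above) =====
set_option maxHeartbeats 2000000 in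
theorem define_total_level_spec : Claim_equal_define_total_level := by
  intro g l w r v _
  unfold Spec_define_total_level define_total_level define_total_level_alt
  by_cases hd : g == "-" || l == "-" || w == "-" || r == "-" || v == "-"
  · simp [hd]
  · simp only [hd, Bool.false_eq_true, not_false_eq_true, if_neg]
    by_cases hg1 : g = "A1" <;> by_cases hg2 : g = "A2" <;> by_cases hg3 : g = "B1" <;>
    by_cases hv1 : v = "A1" <;> by_cases hv2 : v = "A2" <;> by_cases hv3 : v = "B1" <;>
    by_cases hw1 : w = "A1" <;> by_cases hw2 : w = "A2" <;> by_cases hw3 : w = "B1" <;>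
      first
      | (simp_all [pvBucket, pvTable_eq, PySem.Dict.get?_mk_cons, PySem.Dict.get?, List.find?_cons]; done)
      | (have hg1' := Ne.symm hg1; have hg2' := Ne.symm hg2; have hg3' := Ne.symm hg3
         simp_all [pvBucket, pvTable_eq, PySem.Dict.get?_mk_cons, PySem.Dict.get?, List.find?_cons])
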